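-- pv_equiv track=rewrite | github.com/choderalab/yank-benchmark | scripts/rename.py | rename_charged
-- ===== SOURCE A (Python) =====
-- def rename_charged(npdb, terminology = 'AMBER'):
--     """Generate AMBER-specific residue names for charged residues from MCCE residue names. Also fix some problems with atom naming (specifically hydrogens) for charged residues.
--
--     ARGUMENTS
--         npdb - "nested" PDB data structure generated by nest_pdb. Modified to reflect AMBER names.
--
--     OPTIONAL ARGUMENTS
--         terminology       default 'AMBER', which protonates residues using naming recognized by AMBER and the ffamber ports for GROMACS from the Sorin lab.
--                           Optionally, specify 'gAMBER' for the GROMACS AMBER format, which has some slightly different residue naming conventions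
--                           (for example, LYP -> LYS, LYS -> LYN, and CYN -> CYS, CYS2 -> CYM )
--
--     CHANGE LOG:
--     - DLM 7-1-2009: Modified to fix naming of HE1 in GLH to HE2 to conform to ffamber rtp.
--     """
--
--     resname_and_state = list(map(lambda x:x[-1][17:20]+x[-1][-1],npdb))
--     #print resname_and_state
--     for i in range(len(npdb)):
--         if (resname_and_state[i]=='HIS+'):
--             npdb[i] = list(map(lambda x:x.replace('HIS','HIP'),npdb[i]))
--         elif (resname_and_state[i]=='LYS0'):
--             if terminology == 'AMBER':
--                 npdb[i] = list(map(lambda x:x.replace('LYS','LYN'),npdb[i]))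
--             elif terminology == 'gAMBER':
--                 npdb[i] = list(map(lambda x:x.replace('LYS','LYN'),npdb[i]))
--         elif (resname_and_state[i]=='LYS+'):
--             if terminology =='AMBER':
--                 npdb[i] = list(map(lambda x:x.replace('LYS','LYP'),npdb[i]))
--             if terminology =='gAMBER':
--                 npdb[i] = list(map(lambda x:x.replace('LYS','LYS'),npdb[i]))
--         elif (resname_and_state[i]=='CYS0'):
--             if terminology =='AMBER':
--                 npdb[i] = list(map(lambda x:x.replace('CYS','CYN'),npdb[i]))
--             elif terminology =='gAMBER':
--                 npdb[i] = list(map(lambda x:x.replace('CYS','CYS'),npdb[i]))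
--         elif (resname_and_state[i]=='CYS-'):
--             npdb[i] = list(map(lambda x:x.replace('CYS','CYM'),npdb[i]))
--         elif (resname_and_state[i]=='ASP0'):
--             npdb[i] = list(map(lambda x:x.replace('ASP','ASH'),npdb[i]))
--             #DLM 8/25/2009: ASH needs to have HD2, not HD1, for some reason
--             npdb[i] = list(map(lambda x:x.replace('HD1 ASH','HD2 ASH'),npdb[i]))
--         #Aspartate requires no sub
--         elif (resname_and_state[i]=='GLU0'):
--             npdb[i] = list(map(lambda x:x.replace('GLU','GLH'),npdb[i]))
--             #DLM 7-1-2009: Fix GLY HE1 to HE2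
--             npdb[i] = list(map(lambda x:x.replace('HE1 GLH','HE2 GLH'),npdb[i]))
--         # Glutamate requires no sub
--
--         # Also, charge states for TYR are ignored....
--
--
--     return npdb
-- ===== SOURCE B (Python) =====
-- def rename_charged(npdb, terminology='AMBER'):
--     """Staged rewrite: one whole-structure pass per substitution rule, instead of a
--     per-residue branch chain. Correct because the state keys are computed once from the
--     original input (as A does), rules with different keys touch disjoint residues (each
--     residue has exactly one key), and rules sharing a key keep A's order."""
--     rules = [('HIS+', 'HIS', 'HIP'),
--              ('CYS-', 'CYS', 'CYM'),
--              ('ASP0', 'ASP', 'ASH'), ('ASP0', 'HD1 ASH', 'HD2 ASH'),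
--              ('GLU0', 'GLU', 'GLH'), ('GLU0', 'HE1 GLH', 'HE2 GLH')]
--     if terminology == 'AMBER':
--         rules += [('LYS0', 'LYS', 'LYN'), ('LYS+', 'LYS', 'LYP'), ('CYS0', 'CYS', 'CYN')]
--     elif terminology == 'gAMBER':
--         rules += [('LYS0', 'LYS', 'LYN')]
--     keys = [res[-1][17:20] + res[-1][-1] for res in npdb]
--     out = npdb
--     for key, old, new in rules:
--         out = [[line.replace(old, new) for line in res] if k == key else res
--                for k, res in zip(keys, out)]
--     return out
-- ===== Notes on version B (the rewrite author's own statement) =====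
-- stated objective: alternative
-- what changed: Flips the loop nesting: instead of one pass over residues with a seven-way elif chain and nested terminology ifs, B builds a flat list of (key, old, new) rules chosen once per terminology (dropping A's identity substitutions) and makes one whole-structure pass per rule, rewriting exactly the residues whose precomputed state key matches; Pre_ excludes inputs with an empty residue or empty last line, on which A raises IndexError (B raises there too); B returns a new list instead of assigning npdb[i] in place (return value is what is proved equal).
import Mathlib
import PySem

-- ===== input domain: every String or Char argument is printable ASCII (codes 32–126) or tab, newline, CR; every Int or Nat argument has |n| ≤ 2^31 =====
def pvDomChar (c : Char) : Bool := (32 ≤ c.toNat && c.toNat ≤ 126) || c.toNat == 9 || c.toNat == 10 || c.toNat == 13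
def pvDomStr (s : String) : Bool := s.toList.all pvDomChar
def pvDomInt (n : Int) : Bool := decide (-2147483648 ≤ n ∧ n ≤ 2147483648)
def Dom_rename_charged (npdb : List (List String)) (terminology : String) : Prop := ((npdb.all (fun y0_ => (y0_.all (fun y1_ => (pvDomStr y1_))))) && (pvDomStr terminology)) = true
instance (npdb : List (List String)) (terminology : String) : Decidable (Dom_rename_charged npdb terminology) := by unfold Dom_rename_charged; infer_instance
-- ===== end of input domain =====

-- B flips the loop nesting: a flat rule list chosen per terminology and one whole-structure pass
-- per rule, instead of A's per-residue elif chain (objective: alternative); A mutates npdb in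
-- place while B builds new lists — the equivalence proved here is about the RETURN value only.


-- shared key computation: x[-1][17:20] + x[-1][-1]  (both Pythons compute exactly this expression)
def pvKey (res : List String) : List Char :=
  let last := PySem.List.pyGetD res (-1) ""
  PySem.List.slice last.toList (some 17) (some 20) ++ [(PySem.List.pyGet? last.toList (-1)).getD ' ']

-- ===== PORT A =====
def rename_charged (npdb : List (List String)) (terminology : String) : List (List String) :=
  let rs := npdb.map (fun x => pvKey x)
  (PySem.List.pyRange 0 npdb.length 1).foldl (fun acc i =>
    let k := PySem.List.pyGetD rs i []
    if k = "HIS+".toList then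
      PySem.List.pySetD acc i ((PySem.List.pyGetD acc i []).map (fun x => PySem.Str.replace x "HIS" "HIP"))
    else if k = "LYS0".toList then
      if terminology = "AMBER" then
        PySem.List.pySetD acc i ((PySem.List.pyGetD acc i []).map (fun x => PySem.Str.replace x "LYS" "LYN"))
      else if terminology = "gAMBER" then
        PySem.List.pySetD acc i ((PySem.List.pyGetD acc i []).map (fun x => PySem.Str.replace x "LYS" "LYN"))
      else acc
    else if k = "LYS+".toList then
      let acc1 :=
        if terminology = "AMBER" then
          PySem.List.pySetD acc i ((PySem.List.pyGetD acc i []).map (fun x => PySem.Str.replace x "LYS" "LYP"))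
        else acc
      if terminology = "gAMBER" then
        PySem.List.pySetD acc1 i ((PySem.List.pyGetD acc1 i []).map (fun x => PySem.Str.replace x "LYS" "LYS"))
      else acc1
    else if k = "CYS0".toList then
      if terminology = "AMBER" then
        PySem.List.pySetD acc i ((PySem.List.pyGetD acc i []).map (fun x => PySem.Str.replace x "CYS" "CYN"))
      else if terminology = "gAMBER" then
        PySem.List.pySetD acc i ((PySem.List.pyGetD acc i []).map (fun x => PySem.Str.replace x "CYS" "CYS"))
      else acc
    else if k = "CYS-".toList then
      PySem.List.pySetD acc i ((PySem.List.pyGetD acc i []).map (fun x => PySem.Str.replace x "CYS" "CYM"))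
    else if k = "ASP0".toList then
      let acc1 := PySem.List.pySetD acc i ((PySem.List.pyGetD acc i []).map (fun x => PySem.Str.replace x "ASP" "ASH"))
      PySem.List.pySetD acc1 i ((PySem.List.pyGetD acc1 i []).map (fun x => PySem.Str.replace x "HD1 ASH" "HD2 ASH"))
    else if k = "GLU0".toList then
      let acc1 := PySem.List.pySetD acc i ((PySem.List.pyGetD acc i []).map (fun x => PySem.Str.replace x "GLU" "GLH"))
      PySem.List.pySetD acc1 i ((PySem.List.pyGetD acc1 i []).map (fun x => PySem.Str.replace x "HE1 GLH" "HE2 GLH"))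
    else acc) npdb

-- ===== PORT B =====
def pvRules (terminology : String) : List (List Char × String × String) :=
  [("HIS+".toList, ("HIS", "HIP")),
   ("CYS-".toList, ("CYS", "CYM")),
   ("ASP0".toList, ("ASP", "ASH")), ("ASP0".toList, ("HD1 ASH", "HD2 ASH")),
   ("GLU0".toList, ("GLU", "GLH")), ("GLU0".toList, ("HE1 GLH", "HE2 GLH"))]
  ++ (if terminology = "AMBER" then
        [("LYS0".toList, ("LYS", "LYN")), ("LYS+".toList, ("LYS", "LYP")), ("CYS0".toList, ("CYS", "CYN"))]
      else if terminology = "gAMBER" then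
        [("LYS0".toList, ("LYS", "LYN"))]
      else [])

def rename_charged_alt (npdb : List (List String)) (terminology : String) : List (List String) :=
  let keys := npdb.map (fun res => pvKey res)
  (pvRules terminology).foldl (fun out r =>
    List.zipWith (fun k res =>
      if k = r.1 then res.map (fun line => PySem.Str.replace line r.2.1 r.2.2) else res) keys out) npdb

-- ===== PRECONDITION & SPEC =====
-- Pre_ excludes exactly the inputs on which the Python A raises IndexError (as does B): a residue
-- that is an empty list or whose last line is the empty string (res[-1] / res[-1][-1]).
def Pre_rename_charged (npdb : List (List String)) (terminology : String) : Prop :=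
  ∀ res ∈ npdb, ((res.getLast?).getD "").toList ≠ []
instance (npdb : List (List String)) (terminology : String) : Decidable (Pre_rename_charged npdb terminology) := by
  unfold Pre_rename_charged; infer_instance
def pvWitness_rename_charged : List (List String) × String := ([["ATOM HIS+"]], "AMBER")

def Spec_rename_charged (npdb : List (List String)) (terminology : String) (out : List (List String)) : Prop := out = rename_charged_alt npdb terminology
instance (npdb : List (List String)) (terminology : String) (out : List (List String)) : Decidable (Spec_rename_charged npdb terminology out) := by unfold Spec_rename_charged; infer_instance

-- ===== CLAIM (what is proved, stated in full; the proofs are below) =====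
def Claim_equal_rename_charged : Prop := ∀ (npdb : List (List String)) (terminology : String), Dom_rename_charged npdb terminology → Pre_rename_charged npdb terminology → Spec_rename_charged npdb terminology (rename_charged npdb terminology)

-- ===== LEMMAS AND PROOFS =====

-- the per-residue transformation A performs, as a function of the precomputed key
def stepK (t : String) (k : List Char) (res : List String) : List String :=
  if k = "HIS+".toList then res.map (fun x => PySem.Str.replace x "HIS" "HIP")
  else if k = "LYS0".toList then
    if t = "AMBER" then res.map (fun x => PySem.Str.replace x "LYS" "LYN")
    else if t = "gAMBER" then res.map (fun x => PySem.Str.replace x "LYS" "LYN")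
    else res
  else if k = "LYS+".toList then
    let r1 := if t = "AMBER" then res.map (fun x => PySem.Str.replace x "LYS" "LYP") else res
    if t = "gAMBER" then r1.map (fun x => PySem.Str.replace x "LYS" "LYS") else r1
  else if k = "CYS0".toList then
    if t = "AMBER" then res.map (fun x => PySem.Str.replace x "CYS" "CYN")
    else if t = "gAMBER" then res.map (fun x => PySem.Str.replace x "CYS" "CYS")
    else res
  else if k = "CYS-".toList then res.map (fun x => PySem.Str.replace x "CYS" "CYM")
  else if k = "ASP0".toList then
    (res.map (fun x => PySem.Str.replace x "ASP" "ASH")).map (fun x => PySem.Str.replace x "HD1 ASH" "HD2 ASH")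
  else if k = "GLU0".toList then
    (res.map (fun x => PySem.Str.replace x "GLU" "GLH")).map (fun x => PySem.Str.replace x "HE1 GLH" "HE2 GLH")
  else res

-- the loop body of A's for-loop, named so the loop invariant can be stated about it
def bodyA (t : String) (rs : List (List Char)) : List (List String) → Int → List (List String) :=
  fun acc i =>
    let k := PySem.List.pyGetD rs i []
    if k = "HIS+".toList then
      PySem.List.pySetD acc i ((PySem.List.pyGetD acc i []).map (fun x => PySem.Str.replace x "HIS" "HIP"))
    else if k = "LYS0".toList then
      if t = "AMBER" then
        PySem.List.pySetD acc i ((PySem.List.pyGetD acc i []).map (fun x => PySem.Str.replace x "LYS" "LYN"))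
      else if t = "gAMBER" then
        PySem.List.pySetD acc i ((PySem.List.pyGetD acc i []).map (fun x => PySem.Str.replace x "LYS" "LYN"))
      else acc
    else if k = "LYS+".toList then
      let acc1 :=
        if t = "AMBER" then
          PySem.List.pySetD acc i ((PySem.List.pyGetD acc i []).map (fun x => PySem.Str.replace x "LYS" "LYP"))
        else acc
      if t = "gAMBER" then
        PySem.List.pySetD acc1 i ((PySem.List.pyGetD acc1 i []).map (fun x => PySem.Str.replace x "LYS" "LYS"))
      else acc1
    else if k = "CYS0".toList then
      if t = "AMBER" then
        PySem.List.pySetD acc i ((PySem.List.pyGetD acc i []).map (fun x => PySem.Str.replace x "CYS" "CYN"))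
      else if t = "gAMBER" then
        PySem.List.pySetD acc i ((PySem.List.pyGetD acc i []).map (fun x => PySem.Str.replace x "CYS" "CYS"))
      else acc
    else if k = "CYS-".toList then
      PySem.List.pySetD acc i ((PySem.List.pyGetD acc i []).map (fun x => PySem.Str.replace x "CYS" "CYM"))
    else if k = "ASP0".toList then
      let acc1 := PySem.List.pySetD acc i ((PySem.List.pyGetD acc i []).map (fun x => PySem.Str.replace x "ASP" "ASH"))
      PySem.List.pySetD acc1 i ((PySem.List.pyGetD acc1 i []).map (fun x => PySem.Str.replace x "HD1 ASH" "HD2 ASH"))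
    else if k = "GLU0".toList then
      let acc1 := PySem.List.pySetD acc i ((PySem.List.pyGetD acc i []).map (fun x => PySem.Str.replace x "GLU" "GLH"))
      PySem.List.pySetD acc1 i ((PySem.List.pyGetD acc1 i []).map (fun x => PySem.Str.replace x "HE1 GLH" "HE2 GLH"))
    else acc

theorem replace_go_self (old : List Char) :
    ∀ (fuel : Nat) (l acc : List Char), PySem.Chars.replace.go old old fuel l acc = acc.reverse ++ l := by
  intro fuel
  induction fuel with
  | zero => intro l acc; rw [PySem.Chars.replace.go.eq_def]
  | succ n ih =>
    intro l acc
    cases l with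
    | nil => rw [PySem.Chars.replace.go.eq_def]; simp
    | cons c t =>
      rw [PySem.Chars.replace.go.eq_def]
      simp only []
      by_cases h : old.isPrefixOf (c :: t)
      · rw [if_pos h, ih]
        have hp : old <+: (c :: t) := List.isPrefixOf_iff_prefix.mp h
        have he := List.prefix_iff_eq_append.mp hp
        rw [List.reverse_append, List.reverse_reverse, List.append_assoc, he]
      · rw [if_neg h, ih]
        simp

theorem chars_replace_self (s a : List Char) : PySem.Chars.replace s a a = s := by
  unfold PySem.Chars.replace
  by_cases h : a.isEmpty
  · have ha : a = [] := List.isEmpty_iff.mp h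
    subst ha; simp
  · simp [h, replace_go_self]

theorem str_replace_self (s a : String) : PySem.Str.replace s a a = s := by
  unfold PySem.Str.replace
  rw [chars_replace_self]
  simp

theorem set_append_len {α : Type} (pre : List α) (y v : α) (ys : List α) :
    (pre ++ y :: ys).set pre.length v = pre ++ v :: ys := by
  induction pre with
  | nil => simp
  | cons a l ih => simp [ih]

theorem body_step (t : String) (rs : List (List Char)) (done todo : List (List String)) (res : List String) :
    bodyA t rs (done ++ res :: todo) (done.length : Int)
    = done ++ stepK t (rs.getD done.length []) res :: todo := by
  unfold bodyA
  simp only [stepK, PySem.List.pyGetD_natCast, PySem.List.pySetD_natCast]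
  by_cases hA : t = "AMBER" <;> by_cases hg : t = "gAMBER" <;>
    first
      | exact absurd (hA ▸ hg) (by decide)
      | (split_ifs <;> simp_all [set_append_len])

theorem loopA (t : String) (rs : List (List Char)) :
    ∀ (todo done : List (List String)), done.length + todo.length ≤ rs.length →
    (PySem.List.pyRange (done.length : Int) ((done.length : Int) + todo.length) 1).foldl
      (bodyA t rs) (done ++ todo)
    = done ++ List.zipWith (stepK t) (rs.drop done.length) todo := by
  intro todo
  induction todo with
  | nil =>
    intro done h
    rw [PySem.List.pyRange_one_eq_nil (by simp)]
    simp
  | cons res todo ih =>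
    intro done h
    have hd : (done.length : Int) < (done.length : Int) + (res :: todo).length := by simp
    rw [PySem.List.pyRange_one_cons hd, List.foldl_cons, body_step]
    have hlen : done.length < rs.length := by simp at h; omega
    have e1 : done ++ stepK t (rs.getD done.length []) res :: todo
        = (done ++ [stepK t (rs.getD done.length []) res]) ++ todo := by simp
    have e2 : (done.length : Int) + 1 = (((done ++ [stepK t (rs.getD done.length []) res]).length : Int)) := by
      simp
    have e3 : (done.length : Int) + ((res :: todo).length : Int)
        = (((done ++ [stepK t (rs.getD done.length []) res]).length : Int)) + (todo.length : Int) := by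
      simp; omega
    rw [e1, e2, e3, ih _ (by simp; omega)]
    have hdrop : rs.drop done.length = rs[done.length] :: rs.drop (done.length + 1) :=
      List.drop_eq_getElem_cons hlen
    have hgetD : rs.getD done.length [] = rs[done.length] := List.getD_eq_getElem rs [] hlen
    rw [hdrop, hgetD, List.zipWith_cons_cons]
    simp

theorem zipWith_map_self {α β γ : Type} (f : β → α → γ) (g : α → β) (l : List α) :
    List.zipWith f (l.map g) l = l.map (fun a => f (g a) a) := by
  induction l with
  | nil => rfl
  | cons a l ih => simp [ih]

theorem A_as_map (npdb : List (List String)) (t : String) :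
    rename_charged npdb t = npdb.map (fun res => stepK t (pvKey res) res) := by
  have h := loopA t (npdb.map (fun x => pvKey x)) npdb [] (by simp)
  simp only [List.nil_append, List.length_nil, Nat.cast_zero, zero_add, List.drop_zero] at h
  calc rename_charged npdb t
      = (PySem.List.pyRange 0 (npdb.length : Int) 1).foldl (bodyA t (npdb.map (fun x => pvKey x))) npdb := rfl
    _ = List.zipWith (stepK t) (npdb.map (fun x => pvKey x)) npdb := h
    _ = npdb.map (fun res => stepK t (pvKey res) res) := zipWith_map_self _ _ _

-- B-side: swap the fold over rules with the map over residues
theorem zipWith_id {α β : Type} (keys : List α) (out : List β) (h : keys.length = out.length) :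
    List.zipWith (fun _ res => res) keys out = out := by
  induction keys generalizing out with
  | nil => cases out with | nil => rfl | cons _ _ => simp at h
  | cons k ks ih =>
    cases out with
    | nil => simp at h
    | cons o os => simpa using ih os (by simpa using h)

theorem zipWith_zipWith_same {α β : Type} (f g : α → β → β) (keys : List α) (out : List β) :
    List.zipWith f keys (List.zipWith g keys out) = List.zipWith (fun k res => f k (g k res)) keys out := by
  induction keys generalizing out with
  | nil => rfl
  | cons k ks ih =>
    cases out with
    | nil => rfl
    | cons o os => simp [ih]

theorem foldl_zipWith_swap {α β ρ : Type} (g : α → ρ → β → β) :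
    ∀ (rules : List ρ) (keys : List α) (out : List β), keys.length = out.length →
    rules.foldl (fun o r => List.zipWith (fun k res => g k r res) keys o) out
    = List.zipWith (fun k res => rules.foldl (fun res r => g k r res) res) keys out := by
  intro rules
  induction rules with
  | nil => intro keys out h; exact (zipWith_id keys out h).symm
  | cons r rules ih =>
    intro keys out h
    rw [List.foldl_cons,
        ih keys _ (by rw [List.length_zipWith]; omega),
        zipWith_zipWith_same]
    simp

theorem B_as_map (npdb : List (List String)) (t : String) :
    rename_charged_alt npdb t
    = npdb.map (fun res =>
        (pvRules t).foldl
          (fun cur r => if pvKey res = r.1 then cur.map (fun line => PySem.Str.replace line r.2.1 r.2.2) else cur)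
          res) := by
  unfold rename_charged_alt
  rw [foldl_zipWith_swap _ (pvRules t) (npdb.map (fun res => pvKey res)) npdb (by simp),
      zipWith_map_self]

theorem step_eq (t : String) (k : List Char) (res : List String) :
    stepK t k res
      = (pvRules t).foldl
          (fun cur r => if k = r.1 then cur.map (fun line => PySem.Str.replace line r.2.1 r.2.2) else cur)
          res := by
  by_cases hA : t = "AMBER"
  · subst hA
    simp only [pvRules, if_pos rfl, List.foldl_append, List.foldl_cons, List.foldl_nil, stepK]
    split_ifs <;> simp_all [str_replace_self]
  · by_cases hg : t = "gAMBER"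
    · subst hg
      simp only [pvRules, if_neg hA, if_pos rfl, List.foldl_append, List.foldl_cons, List.foldl_nil, stepK]
      split_ifs <;> simp_all [str_replace_self]
    · simp only [pvRules, if_neg hA, if_neg hg, List.foldl_append, List.foldl_cons, List.foldl_nil, stepK]
      split_ifs <;> simp_all [str_replace_self]

-- ===== VERDICT (by name: the statement is the Claim_ definition above) =====
theorem rename_charged_spec : Claim_equal_rename_charged := by
  intro npdb t _ _
  unfold Spec_rename_charged
  rw [A_as_map, B_as_map]
  exact List.map_congr_left (fun res _ => step_eq t (pvKey res) res)
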